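-- pv_equiv track=rewrite | github.com/swastik-nandy/Docs-chatbot | backend/rag/ingestion/parser/adapters/mdx_adapter.py | _remove_export_blocks
-- ===== SOURCE A (Python) =====
-- from typing import Dict, List, Tuple
--
-- def _remove_export_blocks(text: str) -> str:
--     """
--     Remove export declarations conservatively.
--
--     Handles common MDX patterns:
--     - export const x = ...
--     - export const x = { ... }
--     - export default ...
--     """
--
--     lines = text.splitlines()
--     output: List[str] = []
--
--     skipping = False
--     brace_depth = 0
--
--     for line in lines:
--         stripped = line.strip()
--
--         if not skipping and stripped.startswith("export "):
--             # Multiline export block.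
--             if "{" in line and not stripped.endswith(";"):
--                 skipping = True
--                 brace_depth = line.count("{") - line.count("}")
--                 continue
--
--             # Single-line export.
--             continue
--
--         if skipping:
--             brace_depth += line.count("{") - line.count("}")
--
--             if brace_depth <= 0:
--                 skipping = False
--                 brace_depth = 0
--
--             continue
--
--         output.append(line)
--
--     return "\n".join(output)
-- ===== SOURCE B (Python) =====
-- def _block_end(lines, j, depth):
--     """First index after the block: advance from j, adding each line's brace
--     delta to depth, until depth falls to <= 0 (that line is included) or the
--     lines run out."""
--     n = len(lines)
--     while j < n:
--         depth += lines[j].count("{") - lines[j].count("}")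
--         if depth <= 0:
--             return j + 1
--         j += 1
--     return j
--
--
-- def _export_intervals(lines):
--     """Stage 1: the half-open index intervals [s, e) of lines belonging to an
--     export declaration (single-line or brace-delimited block)."""
--     intervals = []
--     i = 0
--     n = len(lines)
--     while i < n:
--         stripped = lines[i].strip()
--         if stripped.startswith("export "):
--             if "{" in lines[i] and not stripped.endswith(";"):
--                 e = _block_end(lines, i + 1,
--                                lines[i].count("{") - lines[i].count("}"))
--             else:
--                 e = i + 1
--             intervals.append((i, e))
--             i = e
--         else:
--             i += 1
--     return intervals
--
--
-- def _remove_export_blocks(text: str) -> str: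
--     """Staged rewrite: first compute the index intervals covered by export
--     declarations, then keep exactly the lines whose index lies in none of
--     them."""
--     lines = text.splitlines()
--     intervals = _export_intervals(lines)
--     kept = [line for idx, line in enumerate(lines)
--             if not any(s <= idx < e for s, e in intervals)]
--     return "\n".join(kept)
-- ===== Notes on version B (the rewrite author's own statement) =====
-- stated objective: alternative
-- what changed: Replaces A's one-pass skipping-flag/brace-depth state machine that appends kept lines as it goes by a staged algorithm: first compute the half-open index intervals covered by export declarations, then rebuild the output by filtering enumerate(lines) on non-membership in any interval.
import Mathlib
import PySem

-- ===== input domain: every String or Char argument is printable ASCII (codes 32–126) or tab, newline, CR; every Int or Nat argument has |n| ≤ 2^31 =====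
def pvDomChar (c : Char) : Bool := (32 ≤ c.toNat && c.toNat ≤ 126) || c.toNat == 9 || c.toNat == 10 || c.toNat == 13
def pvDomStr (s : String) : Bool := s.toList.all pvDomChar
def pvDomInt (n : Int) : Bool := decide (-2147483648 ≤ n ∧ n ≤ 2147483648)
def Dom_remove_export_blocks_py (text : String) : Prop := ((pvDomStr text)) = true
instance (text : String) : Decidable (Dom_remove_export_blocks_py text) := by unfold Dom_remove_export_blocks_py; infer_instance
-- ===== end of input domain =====

-- B replaces A's one-pass skipping-flag state machine by a staged algorithm:
-- compute the index intervals covered by export declarations, then filter the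
-- enumerated lines by interval membership (objective: alternative).

-- ===== PORT A =====
-- A's loop body: state (output, skipping, brace_depth)
def aStep (s : List String × Bool × Int) (line : String) : List String × Bool × Int :=
  let output := s.1
  let skipping := s.2.1
  let brace_depth := s.2.2
  let stripped := PySem.Str.strip line
  if !skipping && PySem.Str.startswith stripped "export " then
    if PySem.Str.isIn "{" line && !(PySem.Str.endswith stripped ";") then
      (output, true, (PySem.Str.count line "{" : Int) - (PySem.Str.count line "}" : Int))
    else
      (output, skipping, brace_depth)
  else if skipping then
    let d := brace_depth + (PySem.Str.count line "{" : Int) - (PySem.Str.count line "}" : Int)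
    if d ≤ 0 then (output, false, 0) else (output, true, d)
  else
    (output ++ [line], skipping, brace_depth)

def remove_export_blocks_py (text : String) : String :=
  PySem.Str.join "\n" (((PySem.Str.splitlines text).foldl aStep ([], false, 0)).1)

-- ===== PORT B =====
-- brace delta of a line: line.count("{") - line.count("}")
def pvDelta (line : String) : Int :=
  (PySem.Str.count line "{" : Int) - (PySem.Str.count line "}" : Int)

-- B's helper _block_end: first index after the block, scanning from j
def pvBlockEnd (lines : List String) (j : Nat) (depth : Int) : Nat :=
  if h : j < lines.length then
    let d := depth + pvDelta lines[j]
    if d ≤ 0 then j + 1 else pvBlockEnd lines (j + 1) d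
  else j
  termination_by lines.length - j
  decreasing_by exact Nat.sub_succ_lt_self _ _ h

lemma le_pvBlockEnd (lines : List String) (j : Nat) (depth : Int) :
    j ≤ pvBlockEnd lines j depth := by
  fun_induction pvBlockEnd with
  | case1 => exact Nat.le_succ _
  | case2 _ _ _ _ _ ih => exact Nat.le_trans (Nat.le_succ _) ih
  | case3 => exact Nat.le_refl _

-- termination measure step for pvIntervals
lemma pvDecAux {len i e : Nat} (h : i < len) (he : i + 1 ≤ e) : len - e < len - i :=
  Nat.lt_of_le_of_lt (Nat.sub_le_sub_left he _) (Nat.sub_succ_lt_self _ _ h)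

-- B's helper _export_intervals: stage 1, the intervals [s, e) of export lines
def pvIntervals (lines : List String) (i : Nat) : List (Nat × Nat) :=
  if h : i < lines.length then
    let stripped := PySem.Str.strip lines[i]
    if PySem.Str.startswith stripped "export " then
      let e := if PySem.Str.isIn "{" lines[i] && !(PySem.Str.endswith stripped ";") then
                 pvBlockEnd lines (i + 1) (pvDelta lines[i])
               else i + 1
      (i, e) :: pvIntervals lines e
    else pvIntervals lines (i + 1)
  else []
  termination_by lines.length - i
  decreasing_by
    · refine pvDecAux h ?_
      split
      · exact le_pvBlockEnd lines (i + 1) _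
      · exact Nat.le_refl _
    · exact Nat.sub_succ_lt_self _ _ h

-- 'any(s <= idx < e for s, e in intervals)'
def pvInAny (idx : Nat) (ivs : List (Nat × Nat)) : Bool :=
  ivs.any (fun p => p.1 ≤ idx && idx < p.2)

-- enumerate(lines) (indices are nonnegative, kept as Nat)
def pvEnum (k : Nat) : List String → List (Nat × String)
  | [] => []
  | l :: rest => (k, l) :: pvEnum (k + 1) rest

def remove_export_blocks_py_alt (text : String) : String :=
  let lines := PySem.Str.splitlines text
  let ivs := pvIntervals lines 0
  PySem.Str.join "\n"
    (((pvEnum 0 lines).filter (fun p => !pvInAny p.1 ivs)).map Prod.snd)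

-- ===== PRECONDITION & SPEC =====
def Spec_remove_export_blocks_py (text : String) (out : String) : Prop := out = remove_export_blocks_py_alt text
instance (text : String) (out : String) : Decidable (Spec_remove_export_blocks_py text out) := by unfold Spec_remove_export_blocks_py; infer_instance

-- ===== CLAIM (what is proved, stated in full; the proofs are below) =====
def Claim_equal_remove_export_blocks_py : Prop := ∀ (text : String), Dom_remove_export_blocks_py text → Spec_remove_export_blocks_py text (remove_export_blocks_py text)

-- ===== LEMMAS AND PROOFS =====

-- common characterization: the inner consumption of a brace block …
def pvConsume (depth : Int) : List String → List String
  | [] => []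
  | l :: rest =>
      let d := depth + pvDelta l
      if d ≤ 0 then rest else pvConsume d rest

lemma pvConsume_length_le (depth : Int) (xs : List String) :
    (pvConsume depth xs).length ≤ xs.length := by
  induction xs generalizing depth with
  | nil => simp [pvConsume]
  | cons l rest ih =>
      simp only [pvConsume]
      split
      · simp
      · exact Nat.le_trans (ih _) (Nat.le_succ _)

-- … and the recursive characterization of the kept lines
def pvGo : List String → List String
  | [] => []
  | l :: rest =>
      let stripped := PySem.Str.strip l
      if PySem.Str.startswith stripped "export " then
        if PySem.Str.isIn "{" l && !(PySem.Str.endswith stripped ";") then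
          pvGo (pvConsume (pvDelta l) rest)
        else
          pvGo rest
      else
        l :: pvGo rest
  termination_by xs => xs.length
  decreasing_by
    all_goals first
      | exact Nat.lt_succ_of_le (pvConsume_length_le _ _)
      | exact Nat.lt_succ_self _

-- ---- A's fold equals pvGo ----
lemma aStep_skip (out : List String) (d : Int) (l : String) :
    aStep (out, true, d) l =
      if d + pvDelta l ≤ 0 then (out, false, 0) else (out, true, d + pvDelta l) := by
  simp [aStep, pvDelta, add_sub_assoc]

lemma aStep_nonskip (out : List String) (d : Int) (l : String) :
    aStep (out, false, d) l =
      if PySem.Str.startswith (PySem.Str.strip l) "export " then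
        if PySem.Str.isIn "{" l && !(PySem.Str.endswith (PySem.Str.strip l) ";") then
          (out, true, pvDelta l)
        else (out, false, d)
      else (out ++ [l], false, d) := by
  simp only [aStep, pvDelta, Bool.not_false, Bool.true_and]
  split <;> simp

lemma foldl_aStep_skipping (xs : List String) :
    ∀ (out : List String) (d : Int),
      (xs.foldl aStep (out, true, d)).1 = ((pvConsume d xs).foldl aStep (out, false, 0)).1 := by
  induction xs with
  | nil => intro out d; simp [pvConsume]
  | cons l rest ih =>
      intro out d
      rw [List.foldl_cons, aStep_skip]
      simp only [pvConsume]
      by_cases h : d + pvDelta l ≤ 0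
      · rw [if_pos h, if_pos h]
      · rw [if_neg h, if_neg h, ih]

lemma foldl_aStep_eq_pvGo (n : Nat) :
    ∀ (xs : List String), xs.length ≤ n → ∀ (out : List String) (d : Int),
      (xs.foldl aStep (out, false, d)).1 = out ++ pvGo xs := by
  induction n with
  | zero =>
      intro xs h out d
      cases xs with
      | nil => simp [pvGo]
      | cons l rest => simp at h
  | succ n ih =>
      intro xs h out d
      cases xs with
      | nil => simp [pvGo]
      | cons l rest =>
          rw [List.foldl_cons, aStep_nonskip]
          simp only [pvGo]
          by_cases hs : PySem.Str.startswith (PySem.Str.strip l) "export " = true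
          · rw [if_pos hs, if_pos hs]
            by_cases hb : (PySem.Str.isIn "{" l && !(PySem.Str.endswith (PySem.Str.strip l) ";")) = true
            · rw [if_pos hb, if_pos hb, foldl_aStep_skipping,
                  ih _ (Nat.le_trans (pvConsume_length_le _ _) (Nat.le_of_succ_le_succ h))]
            · rw [if_neg hb, if_neg hb]
              exact ih rest (Nat.le_of_succ_le_succ h) out d
          · rw [if_neg hs, if_neg hs,
                ih rest (Nat.le_of_succ_le_succ h) (out ++ [l]) d]
            simp

-- ---- B's staged computation equals pvGo ----
-- intermediate form of B's filtering comprehension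
def pvFilterFrom (k : Nat) (ivs : List (Nat × Nat)) : List String → List String
  | [] => []
  | l :: rest =>
      if pvInAny k ivs then pvFilterFrom (k + 1) ivs rest
      else l :: pvFilterFrom (k + 1) ivs rest

lemma enum_filter_eq_pvFilterFrom (ivs : List (Nat × Nat)) (xs : List String) :
    ∀ (k : Nat),
      ((pvEnum k xs).filter (fun p => !pvInAny p.1 ivs)).map Prod.snd = pvFilterFrom k ivs xs := by
  induction xs with
  | nil => intro k; simp [pvEnum, pvFilterFrom]
  | cons l rest ih =>
      intro k
      simp only [pvEnum, pvFilterFrom, List.filter_cons]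
      by_cases h : pvInAny k ivs
      · simp [h, ih]
      · simp [h, ih]

-- pvConsume on a suffix reaches exactly pvBlockEnd
lemma pvConsume_drop (lines : List String) :
    ∀ (j : Nat) (d : Int), j ≤ lines.length →
      pvConsume d (lines.drop j) = lines.drop (pvBlockEnd lines j d) := by
  intro j
  induction hn : lines.length - j generalizing j with
  | zero =>
      intro d hj
      have hj' : j = lines.length := by omega
      subst hj'
      rw [pvBlockEnd]
      simp [pvConsume]
  | succ n ih =>
      intro d hj
      have hlt : j < lines.length := by omega
      rw [List.drop_eq_getElem_cons hlt]
      rw [pvBlockEnd]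
      simp only [pvConsume, hlt, dif_pos]
      by_cases h : d + pvDelta lines[j] ≤ 0
      · rw [if_pos h, if_pos h]
      · rw [if_neg h, if_neg h, ih (j + 1) (by omega) _ (by omega)]

-- every interval produced from cursor i starts at or after i
lemma pvIntervals_start_ge_aux (lines : List String) (n : Nat) :
    ∀ (i : Nat), lines.length - i ≤ n →
      ∀ (p : Nat × Nat), p ∈ pvIntervals lines i → i ≤ p.1 := by
  induction n with
  | zero =>
      intro i hi p hp
      rw [pvIntervals] at hp
      have : ¬ i < lines.length := by omega
      simp [this] at hp
  | succ n ih =>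
      intro i hi p hp
      by_cases hlt : i < lines.length
      case neg =>
        rw [pvIntervals] at hp
        simp [hlt] at hp
      rw [pvIntervals] at hp
      simp only [hlt, dif_pos] at hp
      split at hp
      · rcases List.mem_cons.mp hp with h | h
        · subst h; omega
        · set e := if PySem.Str.isIn "{" lines[i] && !(PySem.Str.endswith (PySem.Str.strip lines[i]) ";") then
                 pvBlockEnd lines (i + 1) (pvDelta lines[i]) else i + 1 with he
          have hei : i + 1 ≤ e := by
            rw [he]; split
            · exact le_pvBlockEnd lines (i + 1) _
            · omega
          have := ih e (by omega) p h
          omega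
      · have := ih (i + 1) (by omega) p hp
        omega

lemma pvIntervals_start_ge (lines : List String) :
    ∀ (i : Nat) (p : Nat × Nat), p ∈ pvIntervals lines i → i ≤ p.1 :=
  fun i => pvIntervals_start_ge_aux lines (lines.length - i) i (le_refl _)

-- a fully passed head interval never matters again
lemma pvFilterFrom_head_done (s e : Nat) (ivs : List (Nat × Nat)) (xs : List String) :
    ∀ (k : Nat), e ≤ k →
      pvFilterFrom k ((s, e) :: ivs) xs = pvFilterFrom k ivs xs := by
  induction xs with
  | nil => intro k _; simp [pvFilterFrom]
  | cons l rest ih =>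
      intro k hk
      have hhead : pvInAny k ((s, e) :: ivs) = pvInAny k ivs := by
        simp only [pvInAny, List.any_cons]
        have : ¬ k < e := by omega
        simp [this]
      simp only [pvFilterFrom, hhead, ih (k + 1) (by omega)]

-- the head interval [s, e) swallows all lines with index in it
lemma pvFilterFrom_skip (lines : List String) (s e : Nat) (ivs : List (Nat × Nat)) :
    ∀ (j : Nat), s ≤ j → j ≤ e →
      pvFilterFrom j ((s, e) :: ivs) (lines.drop j) =
      pvFilterFrom e ((s, e) :: ivs) (lines.drop e) := by
  intro j
  induction hn : e - j generalizing j with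
  | zero =>
      intro hs hj
      have : j = e := by omega
      subst this; rfl
  | succ n ih =>
      intro hs hj
      by_cases hlt : j < lines.length
      · rw [List.drop_eq_getElem_cons hlt]
        have hin : pvInAny j ((s, e) :: ivs) = true := by
          simp only [pvInAny, List.any_cons, Bool.or_eq_true]
          left
          simp only [Bool.and_eq_true, decide_eq_true_eq]
          omega
        simp only [pvFilterFrom, hin, if_pos]
        exact ih (j + 1) (by omega) (by omega) (by omega)
      · have h1 : lines.drop j = [] := List.drop_eq_nil_of_le (by omega)
        have h2 : lines.drop e = [] := List.drop_eq_nil_of_le (by omega)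
        rw [h1, h2]
        simp [pvFilterFrom]

-- main: the staged filter from cursor i equals the recursive characterization
lemma pvFilterFrom_intervals_eq_pvGo_aux (lines : List String) (n : Nat) :
    ∀ (i : Nat), lines.length - i ≤ n →
      pvFilterFrom i (pvIntervals lines i) (lines.drop i) = pvGo (lines.drop i) := by
  induction n with
  | zero =>
      intro i hi
      have h1 : lines.drop i = [] := List.drop_eq_nil_of_le (by omega)
      rw [h1, pvIntervals]
      simp [pvGo, pvFilterFrom]
  | succ n ih =>
      intro i hi
      by_cases hlt : i < lines.length
      case neg =>
        have h1 : lines.drop i = [] := List.drop_eq_nil_of_le (by omega)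
        rw [h1, pvIntervals]
        simp [pvGo, pvFilterFrom]
      rw [List.drop_eq_getElem_cons hlt, pvIntervals]
      simp only [hlt, dif_pos]
      by_cases hs : PySem.Str.startswith (PySem.Str.strip lines[i]) "export " = true
      · rw [if_pos hs]
        simp only [pvGo, hs, if_pos]
        by_cases hb : (PySem.Str.isIn "{" lines[i] && !(PySem.Str.endswith (PySem.Str.strip lines[i]) ";")) = true
        · rw [if_pos hb, if_pos hb]
          set e := pvBlockEnd lines (i + 1) (pvDelta lines[i]) with he
          have hie : i + 1 ≤ e := le_pvBlockEnd lines (i + 1) _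
          have hinh : pvInAny i ((i, e) :: pvIntervals lines e) = true := by
            simp only [pvInAny, List.any_cons, Bool.or_eq_true]
            left
            simp only [Bool.and_eq_true, decide_eq_true_eq]
            omega
          simp only [pvFilterFrom, hinh, if_pos]
          rw [show lines.drop (i + 1) = lines.drop (i + 1) from rfl]
          have hstep := pvFilterFrom_skip lines i e (pvIntervals lines e) (i + 1) (by omega) hie
          rw [hstep, pvFilterFrom_head_done i e _ _ e (le_refl e)]
          rw [pvConsume_drop lines (i + 1) _ (by omega), ← he]
          exact ih e (by omega)
        · rw [if_neg hb, if_neg hb]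
          have hinh : pvInAny i ((i, i + 1) :: pvIntervals lines (i + 1)) = true := by
            simp only [pvInAny, List.any_cons, Bool.or_eq_true]
            left
            simp only [Bool.and_eq_true, decide_eq_true_eq]
            omega
          simp only [pvFilterFrom, hinh, if_pos]
          rw [pvFilterFrom_head_done i (i + 1) _ _ (i + 1) (le_refl _)]
          exact ih (i + 1) (by omega)
      · rw [if_neg hs]
        simp only [pvGo, hs]
        have hnin : pvInAny i (pvIntervals lines (i + 1)) = false := by
          simp only [pvInAny, List.any_eq_false]
          intro p hp
          have := pvIntervals_start_ge lines (i + 1) p hp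
          simp only [Bool.and_eq_true, decide_eq_true_eq, not_and]
          omega
        simp only [pvFilterFrom, hnin, Bool.false_eq_true, if_false]
        rw [ih (i + 1) (by omega)]

lemma pvFilterFrom_intervals_eq_pvGo (lines : List String) :
    ∀ (i : Nat),
      pvFilterFrom i (pvIntervals lines i) (lines.drop i) = pvGo (lines.drop i) :=
  fun i => pvFilterFrom_intervals_eq_pvGo_aux lines (lines.length - i) i (le_refl _)

-- ===== VERDICT (by name: the statement is the Claim_ definition above) =====
theorem remove_export_blocks_py_spec : Claim_equal_remove_export_blocks_py := by
  intro text _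
  unfold Spec_remove_export_blocks_py remove_export_blocks_py remove_export_blocks_py_alt
  rw [foldl_aStep_eq_pvGo (PySem.Str.splitlines text).length _ (Nat.le_refl _)]
  simp only [List.nil_append]
  rw [enum_filter_eq_pvFilterFrom]
  have := pvFilterFrom_intervals_eq_pvGo (PySem.Str.splitlines text) 0
  simp only [List.drop_zero] at this
  rw [this]
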